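-- pv_equiv track=rewrite | github.com/evankervella/codesignal | the-core/increaseNumberRoundness/main.py | increaseNumberRoundness
-- ===== SOURCE A (Python) =====
-- def increaseNumberRoundness(n: int) -> bool:
--     n = list(str(n))
--     i = len(n)-1
--     while n[i] == '0' and i >= 0:
--         i -= 1
--     if i == -1:
--         return False
--     for j in range(i-1, -1, -1):
--         if n[j] == '0':
--             return True
--     return False
-- ===== SOURCE B (Python) =====
-- def increaseNumberRoundness(n: int) -> bool:
--     m = abs(n)
--     while m % 10 == 0 and m > 0:
--         m //= 10
--     while m > 0:
--         if m % 10 == 0: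
--             return True
--         m //= 10
--     return False
-- ===== Notes on version B (the rewrite author's own statement) =====
-- stated objective: alternative
-- what changed: B works on the integer itself with modulus and floor division (strip trailing zeros, then scan the remaining digits for a zero digit) instead of building a character list from str(n) and walking it by index.
import Mathlib
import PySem

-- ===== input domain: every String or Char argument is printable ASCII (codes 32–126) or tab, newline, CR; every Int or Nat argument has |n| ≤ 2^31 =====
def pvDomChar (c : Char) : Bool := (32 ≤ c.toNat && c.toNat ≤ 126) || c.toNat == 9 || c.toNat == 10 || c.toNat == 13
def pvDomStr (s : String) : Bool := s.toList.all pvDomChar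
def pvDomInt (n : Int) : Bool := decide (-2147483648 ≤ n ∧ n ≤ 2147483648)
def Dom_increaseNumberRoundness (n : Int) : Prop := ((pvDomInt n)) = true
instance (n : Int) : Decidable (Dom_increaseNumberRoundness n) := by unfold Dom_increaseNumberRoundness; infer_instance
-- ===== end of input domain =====

-- B replaces A's str(n)-to-char-list indexing by pure integer arithmetic (modulus / floor division): strip trailing zeros, then scan the remaining digits for a zero digit.

-- ===== PORT A =====
-- while n[i] == '0' and i >= 0: i -= 1   (n[i] via pyGet?; the loop only recurses when 0 ≤ i)
def pvStripA (cs : List Char) (i : Int) : Int :=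
  if h : PySem.List.pyGet? cs i = some '0' ∧ 0 ≤ i then pvStripA cs (i - 1) else i
  termination_by (i + 1).toNat
  decreasing_by omega

def increaseNumberRoundness (n : Int) : Bool :=
  let cs := PySem.Int.toChars n
  let i := pvStripA cs ((cs.length : Int) - 1)
  if i = -1 then false
  else (PySem.List.pyRange (i - 1) (-1) (-1)).any (fun j => PySem.List.pyGet? cs j == some '0')

-- ===== PORT B =====
-- m = abs(n) ≥ 0, so Python's % and // coincide with Nat's % and / throughout.
-- while m % 10 == 0 and m > 0: m //= 10
def pvStripB (m : Nat) : Nat :=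
  if h : m % 10 = 0 ∧ 0 < m then pvStripB (m / 10) else m
  decreasing_by exact Nat.div_lt_self h.2 (by omega)

-- while m > 0: if m % 10 == 0: return True; m //= 10 / return False
def pvScanB (m : Nat) : Bool :=
  if h : 0 < m then (if m % 10 = 0 then true else pvScanB (m / 10)) else false
  decreasing_by exact Nat.div_lt_self h (by omega)

def increaseNumberRoundness_alt (n : Int) : Bool :=
  pvScanB (pvStripB n.natAbs)

-- ===== PRECONDITION & SPEC =====
def Spec_increaseNumberRoundness (n : Int) (out : Bool) : Prop := out = increaseNumberRoundness_alt n
instance (n : Int) (out : Bool) : Decidable (Spec_increaseNumberRoundness n out) := by unfold Spec_increaseNumberRoundness; infer_instance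

-- ===== CLAIM (what is proved, stated in full; the proofs are below) =====
def Claim_equal_increaseNumberRoundness : Prop := ∀ (n : Int), Dom_increaseNumberRoundness n → Spec_increaseNumberRoundness n (increaseNumberRoundness n)

-- ===== LEMMAS AND PROOFS =====

-- B-side: pvStripB strips the leading zeros of the little-endian digit list.
lemma digits_pvStripB (m : Nat) :
    Nat.digits 10 (pvStripB m) = (Nat.digits 10 m).dropWhile (· == 0) := by
  fun_induction pvStripB with
  | case1 m h ih =>
    rw [Nat.digits_def' (by omega : 1 < 10) h.2, h.1]
    simpa using ih
  | case2 m h =>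
    rcases Nat.eq_zero_or_pos m with h0 | h0
    · simp [h0]
    · rw [Nat.digits_def' (by omega : 1 < 10) h0]
      have hb : (m % 10 == 0) = false := by simp; tauto
      simp [List.dropWhile, hb]

-- B-side: pvScanB checks whether 0 occurs among the digits.
lemma pvScanB_eq (m : Nat) : pvScanB m = decide (0 ∈ Nat.digits 10 m) := by
  fun_induction pvScanB with
  | case1 m h hz =>
    rw [Nat.digits_def' (by omega : 1 < 10) h]
    simp [hz.symm]
  | case2 m h hz ih =>
    rw [Nat.digits_def' (by omega : 1 < 10) h, ih]
    simp
    omega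
  | case3 m h =>
    have : m = 0 := by omega
    simp [this]

-- A-side: Nat.toDigits is the reversed digit list rendered with digitChar.
lemma toDigitsCore_eq (fuel n : Nat) (ds : List Char) (hn : 0 < n) (hf : n ≤ fuel) :
    Nat.toDigitsCore 10 fuel n ds = ((Nat.digits 10 n).map Nat.digitChar).reverse ++ ds := by
  induction fuel generalizing n ds with
  | zero => omega
  | succ f ih =>
    rw [Nat.toDigitsCore.eq_2]
    rw [Nat.digits_def' (by omega : 1 < 10) hn]
    by_cases hq : n / 10 = 0
    · simp [hq]
    · rw [if_neg hq, ih (n / 10) _ (by omega) (by omega)]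
      simp

lemma toDigits_eq (n : Nat) (hn : 0 < n) :
    Nat.toDigits 10 n = ((Nat.digits 10 n).map Nat.digitChar).reverse := by
  rw [Nat.toDigits, toDigitsCore_eq (n + 1) n [] hn (by omega)]
  simp

-- digitChar sends a decimal digit to '0' exactly when it is 0
lemma digitChar_eq_zero_iff (d : Nat) (hd : d < 10) : (Nat.digitChar d = '0') ↔ d = 0 := by
  interval_cases d <;> simp <;> decide

-- the strip loop never looks above its starting index
lemma pvStripA_append (xs : List Char) (x : Char) (i : Int) (hi : i < xs.length) :
    pvStripA (xs ++ [x]) i = pvStripA xs i := by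
  by_cases h0 : 0 ≤ i
  · have hk : i = ((i.toNat : Nat) : Int) := by omega
    rw [hk] at hi ⊢
    generalize i.toNat = k at *
    clear h0 hk i
    induction k using Nat.strong_induction_on with
    | _ k ih =>
      have hget : PySem.List.pyGet? (xs ++ [x]) (k : Int) = PySem.List.pyGet? xs (k : Int) := by
        simp only [PySem.List.pyGet?_natCast]
        rw [List.getElem?_append_left (by exact_mod_cast hi)]
      conv_lhs => rw [pvStripA.eq_def]
      conv_rhs => rw [pvStripA.eq_def]
      rw [hget]
      split_ifs with h
      · rcases Nat.eq_zero_or_pos k with hz | hz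
        · subst hz
          conv_lhs => rw [pvStripA.eq_def]
          conv_rhs => rw [pvStripA.eq_def]
          rw [dif_neg (fun hcon => absurd hcon.2 (by norm_num)),
              dif_neg (fun hcon => absurd hcon.2 (by norm_num))]
        · have hcast : ((k : Int) - 1) = (((k - 1 : Nat) : Nat) : Int) := by omega
          rw [hcast, ih (k - 1) (by omega) (by omega)]
      · rfl
  · conv_lhs => rw [pvStripA.eq_def]
    conv_rhs => rw [pvStripA.eq_def]
    rw [dif_neg (fun hcon => h0 hcon.2), dif_neg (fun hcon => h0 hcon.2)]

-- the strip loop lands on the last non-'0' position, provided one exists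
lemma pvStripA_eq (pre : List Char) (l : List Char) (hl : ∃ c ∈ l, c ≠ '0') :
    pvStripA (pre ++ l.reverse) ((pre.length : Int) + l.length - 1)
      = (pre.length : Int) + (l.dropWhile (· == '0')).length - 1 := by
  induction l generalizing pre with
  | nil => simp at hl
  | cons c l' ih =>
    have hsplit : pre ++ (c :: l').reverse = (pre ++ l'.reverse) ++ [c] := by simp
    have hlen : ((pre.length : Int) + (c :: l').length - 1) = ((pre ++ l'.reverse).length : Int) := by
      simp; omega
    rw [hsplit, hlen]
    have hget : PySem.List.pyGet? ((pre ++ l'.reverse) ++ [c]) ((pre ++ l'.reverse).length : Int)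
        = some c := by
      simpa using PySem.List.pyGet?_append_length (pre := pre ++ l'.reverse) (y := c) (ys := [])
    by_cases hc : c = '0'
    · subst hc
      conv_lhs => rw [pvStripA.eq_def]
      rw [dif_pos ⟨hget, by positivity⟩]
      have hdw : (('0' :: l').dropWhile (· == '0')) = l'.dropWhile (· == '0') := by
        simp [List.dropWhile]
      obtain ⟨d, hd, hd0⟩ := hl
      have hd' : d ∈ l' := by
        rcases hd with _ | hd
        · exact absurd rfl hd0
        · assumption
      rw [pvStripA_append _ _ _ (by simp)]
      have := ih pre ⟨d, hd', hd0⟩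
      rw [hdw]
      calc pvStripA (pre ++ l'.reverse) (((pre ++ l'.reverse).length : Int) - 1)
          = pvStripA (pre ++ l'.reverse) ((pre.length : Int) + l'.length - 1) := by
            congr 1; simp
        _ = (pre.length : Int) + (l'.dropWhile (· == '0')).length - 1 := this
    · conv_lhs => rw [pvStripA.eq_def]
      rw [dif_neg (by
        intro hcon
        rw [hget] at hcon
        exact hc (by simpa using hcon.1))]
      have hb : (c == '0') = false := by simpa using hc
      have : ((c :: l').dropWhile (· == '0')) = c :: l' := by
        simp [List.dropWhile, hb]
      rw [this]
      simp
      omega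

-- the scan loop over range(k-1, -1, -1) checks the first k characters for '0'
lemma scan_eq (cs : List Char) (k : Nat) (hk : k ≤ cs.length) :
    ((PySem.List.pyRange ((k : Int) - 1) (-1) (-1)).any
        (fun j => PySem.List.pyGet? cs j == some '0'))
      = decide ('0' ∈ cs.take k) := by
  induction k with
  | zero =>
    rw [PySem.List.pyRange_neg_one_eq_nil (by omega)]
    simp
  | succ k ih =>
    have hstep : ((k + 1 : Nat) : Int) - 1 = (k : Int) := by push_cast; omega
    rw [hstep, PySem.List.pyRange_neg_one_cons (by omega : (-1 : Int) < k)]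
    have hklt : k < cs.length := by omega
    have hget : PySem.List.pyGet? cs ((k : Int) - 1 + 1) = some cs[k] := by
      norm_num [PySem.List.pyGet?_natCast, List.getElem?_eq_getElem hklt]
    rw [List.any_cons]
    have htake : cs.take (k + 1) = cs.take k ++ [cs[k]] := by
      rw [List.take_add_one, List.getElem?_eq_getElem hklt]
      rfl
    have : PySem.List.pyGet? cs (k : Int) = some cs[k] := by
      simp only [show (k : Int) - 1 + 1 = (k : Int) from by omega] at hget
      exact hget
    rw [this, ih (by omega)]
    rcases eq_or_ne cs[k] '0' with h | h
    · simp [htake, h]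
    · have hb : (some cs[k] == some ('0' : Char)) = false := by simpa using h
      rw [hb, htake]
      simp only [Bool.false_or, decide_eq_decide, List.mem_append, List.mem_singleton]
      constructor
      · exact Or.inl
      · rintro (hm | hm)
        · exact hm
        · exact absurd hm.symm h

-- membership survives dropping the head of a dropWhile result
lemma mem_dropWhile_iff_tail (l : List Nat) :
    (0 ∈ l.dropWhile (· == 0)) ↔ (0 ∈ (l.dropWhile (· == 0)).drop 1) := by
  induction l with
  | nil => simp
  | cons a t ih =>
    by_cases ha : a = 0
    · subst ha
      simpa [List.dropWhile] using ih
    · have hb : (a == 0) = false := by simpa using ha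
      simp [List.dropWhile, hb, Ne.symm ha]

-- dropWhile commutes with digitChar on decimal digit lists
lemma dropWhile_map_digitChar (l : List Nat) (hl : ∀ d ∈ l, d < 10) :
    (l.map Nat.digitChar).dropWhile (· == '0')
      = (l.dropWhile (· == 0)).map Nat.digitChar := by
  induction l with
  | nil => rfl
  | cons d l' ih =>
    have hd : d < 10 := hl d (by simp)
    by_cases h0 : d = 0
    · subst h0
      have hz : (Nat.digitChar 0 == '0') = true := by decide
      simp only [List.map_cons, List.dropWhile, hz]
      exact ih (fun d hd => hl d (by simp [hd]))
    · have h1 : (Nat.digitChar d == '0') = false := by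
        simpa using fun hc => h0 ((digitChar_eq_zero_iff d hd).mp hc)
      have h2 : (d == 0) = false := by simpa using h0
      simp only [List.map_cons, List.dropWhile, h1, h2]

-- main positive-case lemma, with pre = [] or ['-']
lemma main_pos (pre : List Char) (hpre : '0' ∉ pre) (m : Nat) (hm : 0 < m) :
    ((PySem.List.pyRange
        ((pvStripA (pre ++ Nat.toDigits 10 m) ((pre.length + (Nat.toDigits 10 m).length : Int) - 1)) - 1) (-1) (-1)).any
      (fun j => PySem.List.pyGet? (pre ++ Nat.toDigits 10 m) j == some '0'))
      = pvScanB (pvStripB m) := by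
  set dsm := Nat.digits 10 m with hdsm
  have hlt : ∀ d ∈ dsm, d < 10 := fun d hd => Nat.digits_lt_base (by omega) hd
  set l := dsm.map Nat.digitChar with hldef
  have htd : Nat.toDigits 10 m = l.reverse := by
    rw [toDigits_eq m hm, hldef]
  set d' := dsm.dropWhile (· == 0) with hd'
  have hdw : l.dropWhile (· == '0') = d'.map Nat.digitChar := dropWhile_map_digitChar dsm hlt
  -- dsm has a nonzero element (its last digit), hence d' ≠ []
  have hex : ∃ x ∈ dsm, ¬ ((x == 0) = true) := by
    rw [hdsm]
    have hne : Nat.digits 10 m ≠ [] := Nat.digits_ne_nil_iff_ne_zero.mpr (by omega)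
    exact ⟨(Nat.digits 10 m).getLast hne, List.getLast_mem hne,
      by simpa using Nat.getLast_digit_ne_zero 10 (by omega)⟩
  have hd'ne : d' ≠ [] := by
    rw [hd']
    intro hcon
    obtain ⟨x, hx, hx0⟩ := hex
    exact hx0 (List.dropWhile_eq_nil_iff.mp hcon x hx)
  have hexl : ∃ c ∈ l, c ≠ '0' := by
    obtain ⟨x, hx, hx0⟩ := hex
    exact ⟨Nat.digitChar x, List.mem_map_of_mem hx,
      fun hc => hx0 (by simpa using (digitChar_eq_zero_iff x (hlt x hx)).mp hc)⟩
  have hstrip := pvStripA_eq pre l hexl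
  rw [htd]
  have hlen : (l.reverse.length : Int) = (l.length : Int) := by simp
  have hi' : pvStripA (pre ++ l.reverse) ((pre.length + (l.reverse.length : Int)) - 1)
      = (pre.length : Int) + (l.dropWhile (· == '0')).length - 1 := by
    rw [hlen]
    exact hstrip
  rw [hi']
  -- the index as a Nat
  have hd'len : 1 ≤ d'.length := by
    rcases d' with _ | _
    · exact absurd rfl hd'ne
    · simp
  have hdwlen : (l.dropWhile (· == '0')).length = d'.length := by rw [hdw]; simp
  set k : Nat := pre.length + (d'.length - 1) with hk
  have hkey : (pre.length : Int) + (l.dropWhile (· == '0')).length - 1 - 1 = (k : Int) - 1 := by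
    rw [hdwlen, hk]
    push_cast
    omega
  rw [hkey]
  have hd'le : d'.length ≤ l.length := by
    rw [hd']
    have := List.length_dropWhile_le (p := (· == 0)) (l := dsm)
    simp only [hldef, List.length_map]
    omega
  rw [scan_eq (pre ++ l.reverse) k (by simp [hk]; omega)]
  -- compute the membership
  have htake : (pre ++ l.reverse).take k = pre ++ l.reverse.take (d'.length - 1) := by
    rw [hk, List.take_append]
    congr 1
    · simp
    · congr 1
      omega
  have hlsplit : l = l.takeWhile (· == '0') ++ l.dropWhile (· == '0') := (List.takeWhile_append_dropWhile).symm
  have hrevtake : l.reverse.take (d'.length - 1) = ((l.dropWhile (· == '0')).drop 1).reverse := by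
    conv_lhs => rw [hlsplit]
    rw [List.reverse_append, List.take_append]
    have h1 : (l.dropWhile (· == '0')).reverse.take (d'.length - 1)
        = ((l.dropWhile (· == '0')).drop 1).reverse := by
      rw [List.take_reverse, hdwlen,
        show d'.length - (d'.length - 1) = 1 from by omega]
    have h2 : d'.length - 1 - (l.dropWhile (· == '0')).reverse.length = 0 := by
      simp [hdwlen]
    rw [h1, h2]
    simp
  rw [htake, hrevtake, hdw]
  -- now both sides are about membership of 0 / '0'
  rw [pvScanB_eq, digits_pvStripB]
  have hmem : ('0' ∈ pre ++ ((d'.map Nat.digitChar).drop 1).reverse) ↔ (0 ∈ d'.drop 1) := by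
    rw [List.mem_append]
    constructor
    · rintro (h | h)
      · exact absurd h hpre
      · rw [List.mem_reverse, ← List.map_drop, List.mem_map] at h
        obtain ⟨x, hx, hxc⟩ := h
        have hx10 : x < 10 := hlt x ((List.dropWhile_sublist _).subset (List.mem_of_mem_drop hx))
        have : x = 0 := (digitChar_eq_zero_iff x hx10).mp hxc
        rwa [this] at hx
    · intro h
      right
      rw [List.mem_reverse, ← List.map_drop, List.mem_map]
      exact ⟨0, h, rfl⟩
  have hfin : (0 ∈ dsm.dropWhile (· == 0)) ↔ (0 ∈ d'.drop 1) := by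
    rw [← hd']
    exact mem_dropWhile_iff_tail dsm
  simp only [decide_eq_decide]
  rw [hmem, hfin]

-- ===== VERDICT (by name: the statement is the Claim_ definition above) =====
theorem increaseNumberRoundness_spec : Claim_equal_increaseNumberRoundness := by
  intro n _
  unfold Spec_increaseNumberRoundness increaseNumberRoundness increaseNumberRoundness_alt
  rcases eq_or_ne n 0 with rfl | hn
  · have e0 : PySem.Int.toChars 0 = ['0'] := by decide
    have e1 : pvStripA ['0'] ((((['0'] : List Char).length : Nat) : Int) - 1) = -1 := by
      norm_num
      rw [pvStripA.eq_def, dif_pos ⟨by decide, le_refl 0⟩]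
      rw [pvStripA.eq_def, dif_neg (fun hcon => absurd hcon.2 (by norm_num))]
      norm_num
    have e2 : pvStripB 0 = 0 := by rw [pvStripB.eq_def]; simp
    have e3 : pvScanB 0 = false := by rw [pvScanB.eq_def]; simp
    simp only [e0, e1, Int.natAbs_zero, e2, e3]
    simp
  · have hm : 0 < n.natAbs := Int.natAbs_pos.mpr hn
    have hcs : PySem.Int.toChars n = (if n < 0 then ['-'] else []) ++ Nat.toDigits 10 n.natAbs := by
      rw [PySem.Int.toChars]
      split_ifs with h
      · rfl
      · have : n.toNat = n.natAbs := by omega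
        rw [this]
        rfl
    set pre : List Char := if n < 0 then ['-'] else [] with hpredef
    have hpre : '0' ∉ pre := by
      rw [hpredef]
      split_ifs <;> simp
    simp only [hcs]
    have hlencs : (((pre ++ Nat.toDigits 10 n.natAbs).length : Nat) : Int) - 1
        = ((pre.length : Int) + (Nat.toDigits 10 n.natAbs).length) - 1 := by
      simp
    rw [hlencs]
    split_ifs with hi
    · -- the strip index cannot be -1 when m > 0: derive a contradiction
      exfalso
      have hlt : ∀ d ∈ Nat.digits 10 n.natAbs, d < 10 := fun d hd => Nat.digits_lt_base (by omega) hd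
      have hne : Nat.digits 10 n.natAbs ≠ [] := Nat.digits_ne_nil_iff_ne_zero.mpr (by omega)
      have hlast : (Nat.digits 10 n.natAbs).getLast hne ≠ 0 := Nat.getLast_digit_ne_zero 10 (by omega)
      have hexl : ∃ c ∈ (Nat.digits 10 n.natAbs).map Nat.digitChar, c ≠ '0' := by
        refine ⟨Nat.digitChar ((Nat.digits 10 n.natAbs).getLast hne),
          List.mem_map_of_mem (List.getLast_mem hne), fun hc => hlast ?_⟩
        exact (digitChar_eq_zero_iff _ (hlt _ (List.getLast_mem hne))).mp hc
      have htd : Nat.toDigits 10 n.natAbs = ((Nat.digits 10 n.natAbs).map Nat.digitChar).reverse :=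
        toDigits_eq _ hm
      rw [htd] at hi
      have hstrip := pvStripA_eq pre ((Nat.digits 10 n.natAbs).map Nat.digitChar) hexl
      have hlen2 : ((((Nat.digits 10 n.natAbs).map Nat.digitChar).reverse.length : Nat) : Int)
          = (((Nat.digits 10 n.natAbs).map Nat.digitChar).length : Int) := by simp
      rw [show ((pre.length : Int) + (((Nat.digits 10 n.natAbs).map Nat.digitChar).reverse.length : Nat)) - 1
          = ((pre.length : Int) + ((Nat.digits 10 n.natAbs).map Nat.digitChar).length) - 1 by rw [hlen2],
        hstrip] at hi
      have hd'ne : ((Nat.digits 10 n.natAbs).map Nat.digitChar).dropWhile (· == '0') ≠ [] := by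
        intro hcon
        obtain ⟨c, hc, hc0⟩ := hexl
        exact hc0 (by simpa using List.dropWhile_eq_nil_iff.mp hcon c hc)
      have : 1 ≤ (((Nat.digits 10 n.natAbs).map Nat.digitChar).dropWhile (· == '0')).length := by
        rcases h : ((Nat.digits 10 n.natAbs).map Nat.digitChar).dropWhile (· == '0') with _ | _
        · exact absurd h hd'ne
        · simp
      omega
    · exact main_pos pre hpre n.natAbs hm
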